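-- pv_equiv track=rewrite | github.com/thiagoenginner/previos_progra_1 | progra 1_ resolucion de examenes/previo_junio_julio_2020/programa_1.py | obtener_triangulo
-- ===== SOURCE A (Python) =====
-- def obtener_triangulo(lista):
--     if not lista:
--         return lista
--     elif len(lista) == 1:
--         return [lista]
--     else:
--         lista_arriba = [lista[i] + lista[i+1] for i in range(len(lista)-1)]
--         return [lista] + obtener_triangulo(lista_arriba)
-- ===== SOURCE B (Python) =====
-- def obtener_triangulo(lista):
--     if not lista:
--         return lista
--     resultado = []
--     actual = lista
--     while len(actual) > 1:
--         resultado.append(actual)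
--         actual = [actual[i] + actual[i + 1] for i in range(len(actual) - 1)]
--     resultado.append(actual)
--     return resultado
-- ===== Notes on version B (the rewrite author's own statement) =====
-- stated objective: alternative
-- what changed: Replaces the recursive build of the triangle with an iterative while-loop maintaining the current row and accumulating rows front-to-back in a result list.
import Mathlib
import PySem

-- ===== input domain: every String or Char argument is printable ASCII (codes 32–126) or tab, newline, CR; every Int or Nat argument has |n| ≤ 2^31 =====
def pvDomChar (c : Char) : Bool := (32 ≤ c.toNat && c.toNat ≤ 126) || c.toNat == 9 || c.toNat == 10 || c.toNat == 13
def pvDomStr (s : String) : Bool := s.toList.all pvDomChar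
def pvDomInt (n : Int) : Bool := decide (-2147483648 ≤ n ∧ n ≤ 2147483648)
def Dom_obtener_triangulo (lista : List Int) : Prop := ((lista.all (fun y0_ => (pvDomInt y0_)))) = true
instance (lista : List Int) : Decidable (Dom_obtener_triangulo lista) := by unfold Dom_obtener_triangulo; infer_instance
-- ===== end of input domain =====

-- B replaces A's recursion with an explicit while-loop maintaining the current row; same cost, different decomposition.

-- ===== PORT A =====
-- lista_arriba = [lista[i] + lista[i+1] for i in range(len(lista)-1)]  (indices always in range)
def pvFilaArriba (lista : List Int) : List Int :=
  (List.range (lista.length - 1)).map (fun i => lista.getD i 0 + lista.getD (i + 1) 0)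

lemma pvFilaArriba_length (lista : List Int) : (pvFilaArriba lista).length = lista.length - 1 := by
  simp [pvFilaArriba]

def obtener_triangulo (lista : List Int) : List (List Int) :=
  if lista.isEmpty then []
  else if lista.length = 1 then [lista]
  else lista :: obtener_triangulo (pvFilaArriba lista)
termination_by lista.length
decreasing_by
  simp only [pvFilaArriba_length]
  rename_i h1 h2
  rw [List.isEmpty_iff, ← List.length_eq_zero_iff] at h1
  omega

-- ===== PORT B =====
-- actual = [actual[i] + actual[i+1] for i in range(len(actual)-1)]
def pvFilaSiguiente (actual : List Int) : List Int :=
  (List.range (actual.length - 1)).map (fun i => actual.getD i 0 + actual.getD (i + 1) 0)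

lemma pvFilaSiguiente_length (actual : List Int) : (pvFilaSiguiente actual).length = actual.length - 1 := by
  simp [pvFilaSiguiente]

-- while len(actual) > 1: resultado.append(actual); actual = next row — then append the final row
def pvBucle (actual : List Int) (resultado : List (List Int)) : List (List Int) :=
  if actual.length > 1 then pvBucle (pvFilaSiguiente actual) (resultado ++ [actual])
  else resultado ++ [actual]
termination_by actual.length
decreasing_by simp only [pvFilaSiguiente_length]; omega

def obtener_triangulo_alt (lista : List Int) : List (List Int) :=
  if lista.isEmpty then [] else pvBucle lista []

-- ===== PRECONDITION & SPEC =====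
def Spec_obtener_triangulo (lista : List Int) (out : List (List Int)) : Prop := out = obtener_triangulo_alt lista
instance (lista : List Int) (out : List (List Int)) : Decidable (Spec_obtener_triangulo lista out) := by unfold Spec_obtener_triangulo; infer_instance

-- ===== CLAIM (what is proved, stated in full; the proofs are below) =====
def Claim_equal_obtener_triangulo : Prop := ∀ (lista : List Int), Dom_obtener_triangulo lista → Spec_obtener_triangulo lista (obtener_triangulo lista)

-- ===== LEMMAS AND PROOFS =====
lemma pvBucle_eq (n : Nat) (actual : List Int) (resultado : List (List Int))
    (hn : actual.length ≤ n) (hne : ¬ actual.isEmpty) :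
    pvBucle actual resultado = resultado ++ obtener_triangulo actual := by
  induction n generalizing actual resultado with
  | zero => cases actual <;> simp_all
  | succ n ih =>
    by_cases h1 : actual.length > 1
    · rw [pvBucle, if_pos h1, ih (pvFilaSiguiente actual) (resultado ++ [actual])
        (by rw [pvFilaSiguiente_length]; omega)
        (by rw [List.isEmpty_iff, ← List.length_eq_zero_iff, pvFilaSiguiente_length]; omega)]
      conv_rhs => rw [obtener_triangulo, if_neg hne, if_neg (by omega)]
      have hfa : pvFilaArriba actual = pvFilaSiguiente actual := rfl
      simp [hfa]
    · have hlen : actual.length = 1 := by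
        rw [List.isEmpty_iff, ← List.length_eq_zero_iff] at hne; omega
      rw [pvBucle, if_neg h1, obtener_triangulo, if_neg hne, if_pos hlen]

-- ===== VERDICT (by name: the statement is the Claim_ definition above) =====
theorem obtener_triangulo_spec : Claim_equal_obtener_triangulo := by
  intro lista _
  unfold Spec_obtener_triangulo obtener_triangulo_alt
  by_cases h : lista.isEmpty
  · rw [if_pos h, obtener_triangulo, if_pos h]
  · rw [if_neg h, pvBucle_eq lista.length lista [] le_rfl h, List.nil_append]
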